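-- pv_equiv track=rewrite | github.com/quccghe/TCM_Clinic | agents/safety_agent.py | _find_keyword_spans
-- ===== SOURCE A (Python) =====
-- from typing import Dict, Any, List, Tuple, Optional
--
-- def _find_keyword_spans(text: str, keyword: str) -> List[Tuple[int, int]]:
--     spans = []
--     start = 0
--     while True:
--         idx = text.find(keyword, start)
--         if idx < 0:
--             break
--         spans.append((idx, idx + len(keyword)))
--         start = idx + len(keyword)
--     return spans
-- ===== SOURCE B (Python) =====
-- def _find_keyword_spans(text, keyword):
--     k = len(keyword)
--     matches = [i for i in range(len(text) - k + 1) if text[i:i+k] == keyword]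
--     spans = []
--     end = 0
--     for i in matches:
--         if i >= end:
--             spans.append((i, i + k))
--             end = i + k
--     return spans
-- ===== Notes on version B (the rewrite author's own statement) =====
-- stated objective: alternative
-- what changed: Two staged passes instead of one str.find jump loop: first collect ALL (possibly overlapping) match positions by slice comparison over range(len(text)-k+1), then a second greedy pass filters out overlapping positions with an end accumulator.
import Mathlib
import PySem

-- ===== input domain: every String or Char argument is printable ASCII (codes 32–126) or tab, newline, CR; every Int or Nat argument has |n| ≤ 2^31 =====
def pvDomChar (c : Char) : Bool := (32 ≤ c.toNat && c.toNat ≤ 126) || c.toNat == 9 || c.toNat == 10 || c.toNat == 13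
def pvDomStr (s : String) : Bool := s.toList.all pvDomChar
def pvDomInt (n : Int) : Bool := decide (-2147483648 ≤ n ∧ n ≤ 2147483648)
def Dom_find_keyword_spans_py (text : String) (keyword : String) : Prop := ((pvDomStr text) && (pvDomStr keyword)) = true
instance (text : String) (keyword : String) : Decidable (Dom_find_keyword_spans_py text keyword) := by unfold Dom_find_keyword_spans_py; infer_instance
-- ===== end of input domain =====

-- B replaces A's str.find jump loop by two staged passes (collect all match positions, then greedily filter overlaps); same spans, no speed claim.

-- ===== PORT A =====
-- A's while-True loop: idx = text.find(keyword, start); stop on -1, else record (idx, idx+len) and jump.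
-- Fuel text.length+1 bounds the iterations whenever keyword ≠ "" (each step advances start by ≥ 1);
-- the keyword = "" case (where Python loops forever) is excluded by Pre_.
def pvGoA (t kw : List Char) : Nat → Int → List (Int × Int)
  | 0, _ => []
  | fuel+1, start =>
    let idx := PySem.Chars.findFrom t kw start none
    if idx < 0 then []
    else (idx, idx + (kw.length : Int)) :: pvGoA t kw fuel (idx + (kw.length : Int))

def find_keyword_spans_py (text : String) (keyword : String) : List (Int × Int) :=
  pvGoA text.toList keyword.toList (text.toList.length + 1) 0

-- ===== PORT B =====
-- pass 1: matches = [i for i in range(len(text) - k + 1) if text[i:i+k] == keyword]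
def pvMatchesB (t kw : List Char) : List Int :=
  (PySem.List.pyRange 0 ((t.length : Int) - (kw.length : Int) + 1) 1).filter
    (fun i => PySem.List.slice t (some i) (some (i + (kw.length : Int))) == kw)

-- pass 2: for i in matches: if i >= end: append (i, i+k); end = i+k
def pvGreedyB (k : Int) : List Int → Int → List (Int × Int)
  | [], _ => []
  | i :: rest, e => if e ≤ i then (i, i + k) :: pvGreedyB k rest (i + k) else pvGreedyB k rest e

def find_keyword_spans_py_alt (text : String) (keyword : String) : List (Int × Int) :=
  pvGreedyB (keyword.toList.length : Int) (pvMatchesB text.toList keyword.toList) 0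

-- ===== PRECONDITION & SPEC =====
-- Pre_ excludes only keyword = "", on which Python A loops forever (find('') returns start unchanged).
def Pre_find_keyword_spans_py (_text : String) (keyword : String) : Prop := keyword ≠ ""
instance (text : String) (keyword : String) : Decidable (Pre_find_keyword_spans_py text keyword) := by unfold Pre_find_keyword_spans_py; infer_instance
def pvWitness_find_keyword_spans_py : String × String := ("abcab ab", "ab")

def Spec_find_keyword_spans_py (text : String) (keyword : String) (out : List (Int × Int)) : Prop := out = find_keyword_spans_py_alt text keyword
instance (text : String) (keyword : String) (out : List (Int × Int)) : Decidable (Spec_find_keyword_spans_py text keyword out) := by unfold Spec_find_keyword_spans_py; infer_instance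

-- ===== CLAIM (what is proved, stated in full; the proofs are below) =====
def Claim_equal_find_keyword_spans_py : Prop := ∀ (text : String) (keyword : String), Dom_find_keyword_spans_py text keyword → Pre_find_keyword_spans_py text keyword → Spec_find_keyword_spans_py text keyword (find_keyword_spans_py text keyword)

-- ===== LEMMAS AND PROOFS =====

-- a match at j ≥ e makes kw an infix of t.drop e
lemma pvInfixOfMatch (t kw : List Char) (e j : Nat) (hej : e ≤ j) (h : kw <+: t.drop j) :
    kw <:+: t.drop e := by
  have hdd : (t.drop e).drop (j - e) = t.drop j := by
    rw [List.drop_drop]; congr 1; omega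
  exact (h.isInfix).trans (hdd ▸ (List.drop_suffix (j - e) (t.drop e)).isInfix)

-- an infix of t.drop e is a prefix at some position j ≥ e
lemma pvMatchOfInfix (t kw : List Char) (e : Nat) (h : kw <:+: t.drop e) :
    ∃ j : Nat, e ≤ j ∧ kw <+: t.drop j := by
  obtain ⟨s, u, hsu⟩ := h
  refine ⟨e + s.length, by omega, ?_⟩
  have : t.drop (e + s.length) = kw ++ u := by
    rw [← List.drop_drop, ← hsu, List.append_assoc, List.drop_left]
  rw [this]; exact ⟨u, rfl⟩

-- if no position j ≥ e matches, findFrom returns -1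
lemma pvFindNone (t kw : List Char) (e : Nat) (he : e ≤ t.length)
    (h : ∀ j : Nat, e ≤ j → ¬ kw <+: t.drop j) :
    PySem.Chars.findFrom t kw (e : Int) none = -1 := by
  rw [PySem.Chars.findFrom_natCast_eq_neg_one_iff t kw e he]
  intro hinf
  obtain ⟨j, hej, hp⟩ := pvMatchOfInfix t kw e hinf
  exact h j hej hp

-- if j is the LEAST match position ≥ e, findFrom returns j
lemma pvFindLeast (t kw : List Char) (e j : Nat) (he : e ≤ t.length) (hej : e ≤ j)
    (hp : kw <+: t.drop j) (hmin : ∀ i : Nat, e ≤ i → kw <+: t.drop i → j ≤ i) :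
    PySem.Chars.findFrom t kw (e : Int) none = (j : Int) := by
  have hne : PySem.Chars.findFrom t kw (e : Int) none ≠ -1 := by
    rw [Ne, PySem.Chars.findFrom_natCast_eq_neg_one_iff t kw e he]
    exact fun hn => hn (pvInfixOfMatch t kw e j hej hp)
  obtain ⟨hle, hpr, hm⟩ := PySem.Chars.findFrom_natCast_spec t kw e he hne
  set r := PySem.Chars.findFrom t kw (e : Int) none with hr
  have h1 : j ≤ r.toNat := hmin r.toNat (by omega) hpr
  have h2 : ¬ j < r.toNat := fun hlt => hm j hej hlt hp
  omega

-- main loop equivalence: the greedy pass over any sorted complete match list equals A's jump loop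
lemma pvMain (t kw : List Char) (hkw : kw ≠ []) :
    ∀ (M : List Int) (fuel e : Nat),
      (∀ m ∈ M, ∃ j : Nat, m = (j : Int) ∧ kw <+: t.drop j) →
      M.Pairwise (· < ·) →
      (∀ j : Nat, e ≤ j → kw <+: t.drop j → (j : Int) ∈ M) →
      e ≤ t.length → t.length - e < fuel →
      pvGreedyB (kw.length : Int) M (e : Int) = pvGoA t kw fuel (e : Int) := by
  intro M
  induction M with
  | nil =>
    intro fuel e _ _ hcomp he hf
    obtain ⟨g, rfl⟩ : ∃ g, fuel = g + 1 := ⟨fuel - 1, by omega⟩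
    have hfind := pvFindNone t kw e he (fun j hej hp => by simpa using hcomp j hej hp)
    simp only [pvGreedyB, pvGoA, hfind]
    norm_num
  | cons m rest ih =>
    intro fuel e hm hsort hcomp he hf
    obtain ⟨g, rfl⟩ : ∃ g, fuel = g + 1 := ⟨fuel - 1, by omega⟩
    obtain ⟨j, rfl, hpj⟩ := hm m (List.mem_cons_self ..)
    have hk : 0 < kw.length := List.length_pos_iff.mpr hkw
    have hjlen : j + kw.length ≤ t.length := by
      have := hpj.length_le
      simp [List.length_drop] at this
      omega
    by_cases hje : e ≤ j
    · -- j is the least match ≥ e: A finds it, greedy emits it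
      have hmin : ∀ i : Nat, e ≤ i → kw <+: t.drop i → j ≤ i := by
        intro i hei hpi
        have hmem := hcomp i hei hpi
        rcases List.mem_cons.mp hmem with hh | hr
        · have : (i : Int) = (j : Int) := hh
          omega
        · have := (List.pairwise_cons.mp hsort).1 _ hr
          omega
      have hfind := pvFindLeast t kw e j he hje hpj hmin
      have hrec := ih g (j + kw.length) (fun x hx => hm x (List.mem_cons_of_mem _ hx))
        (List.pairwise_cons.mp hsort).2
        (by
          intro i hi hpi
          have hmem := hcomp i (by omega) hpi
          rcases List.mem_cons.mp hmem with hh | hr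
          · have : (i : Int) = (j : Int) := hh
            omega
          · exact hr)
        hjlen (by omega)
      simp only [pvGreedyB, pvGoA, hfind]
      rw [if_pos (by exact_mod_cast hje), if_neg (by omega)]
      have hc : (j : Int) + (kw.length : Int) = ((j + kw.length : Nat) : Int) := by push_cast; ring
      rw [hc, hrec]
    · -- j < e: greedy skips it, the complete-set condition still holds for rest
      have hrec := ih (g + 1) e (fun x hx => hm x (List.mem_cons_of_mem _ hx))
        (List.pairwise_cons.mp hsort).2
        (by
          intro i hi hpi
          have hmem := hcomp i hi hpi
          rcases List.mem_cons.mp hmem with hh | hr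
          · have : (i : Int) = (j : Int) := hh
            omega
          · exact hr)
        he (by omega)
      simp only [pvGreedyB]
      rw [if_neg (by exact_mod_cast hje)]
      exact hrec

-- pvMatchesB is exactly the sorted complete list of match positions
lemma pvMatchesB_mem (t kw : List Char) (m : Int) (hm : m ∈ pvMatchesB t kw) :
    ∃ j : Nat, m = (j : Int) ∧ kw <+: t.drop j := by
  unfold pvMatchesB at hm
  rw [List.mem_filter] at hm
  obtain ⟨hmem, hcond⟩ := hm
  rw [PySem.List.mem_pyRange_one] at hmem
  refine ⟨m.toNat, by omega, ?_⟩
  have hm0 : 0 ≤ m := hmem.1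
  rw [PySem.List.slice_toNat t hm0 (by omega)] at hcond
  have hb : (m + (kw.length : Int)).toNat - m.toNat = kw.length := by omega
  rw [hb, beq_iff_eq] at hcond
  rw [List.prefix_iff_eq_take]
  exact hcond.symm

lemma pvMatchesB_sorted (t kw : List Char) : (pvMatchesB t kw).Pairwise (· < ·) := by
  unfold pvMatchesB
  exact (PySem.List.pairwise_lt_pyRange_one 0 _).filter _

lemma pvMatchesB_complete (t kw : List Char) (hkw : kw ≠ []) (j : Nat) (hp : kw <+: t.drop j) :
    (j : Int) ∈ pvMatchesB t kw := by
  have hk : 0 < kw.length := List.length_pos_iff.mpr hkw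
  have hjlen : j + kw.length ≤ t.length := by
    have := hp.length_le
    simp [List.length_drop] at this
    omega
  unfold pvMatchesB
  rw [List.mem_filter]
  constructor
  · rw [PySem.List.mem_pyRange_one]
    constructor
    · positivity
    · omega
  · have hs : PySem.List.slice t (some (j : Int)) (some ((j : Int) + (kw.length : Int))) =
        (t.drop j).take kw.length := by
      rw [PySem.List.slice_toNat t (by positivity) (by positivity)]
      congr 1; omega
    rw [hs, beq_iff_eq, ← List.prefix_iff_eq_take.mp hp]

-- ===== VERDICT (by name: the statement is the Claim_ definition above) =====
theorem find_keyword_spans_py_spec : Claim_equal_find_keyword_spans_py := by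
  intro text keyword _ hpre
  unfold Spec_find_keyword_spans_py find_keyword_spans_py find_keyword_spans_py_alt
  have hkw : keyword.toList ≠ [] := fun h => hpre (String.toList_eq_nil_iff.mp h)
  have := pvMain text.toList keyword.toList hkw (pvMatchesB text.toList keyword.toList)
    (text.toList.length + 1) 0
    (pvMatchesB_mem text.toList keyword.toList)
    (pvMatchesB_sorted text.toList keyword.toList)
    (fun j _ hp => pvMatchesB_complete text.toList keyword.toList hkw j hp)
    (Nat.zero_le _) (by omega)
  simpa using this.symm
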